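/- GENERATED by farm/mkstatement.py from design/units.tsv (unit `start_decoder.R10c`) and the assertions of Vorbis/Spec/StartDecoderR10.lean — do not edit.
   THE STATEMENT of the proof unit `start_decoder.R10c`: segment R10c of `start_decoder` (23 instructions; entries 0x116248;
   exits 0x1162a1; ranges 0x116248-0x11629c)
   takes each of its entry assertions to one of its exit assertions (`Vorbis.Spec.StartDecoder.SegR10c`), given the contracts of its callees.
   What the names mean: Vorbis/Spec/Basic.lean (the shared hypotheses), Vorbis/Spec/StartDecoderR10.lean (the assertions). The theorem to prove:
   `theorem start_decoder_R10c_ok : Vorbis.Spec.start_decoder_R10c.Statement`. -/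
import Vorbis.Spec.Leaves2
import Vorbis.Spec.Reader
import Vorbis.Spec.StartDecoderR10
namespace Vorbis.Spec.start_decoder_R10c
open X86 X86.User Asan

/-- The statement of unit `start_decoder.R10c`. -/
def Statement : Prop :=
  ∀ (Lay : Layout) (_hLay : Lay.hi = 0x1000000) (μ : Microarch) (_hμ : UserX.MicroOK μ) (u₀ : State)
    (_hcode : HasCodeNat Lay u₀ Vorbis.L.start_decoder.entry Vorbis.Code.code_start_decoder.nat Vorbis.L.start_decoder.size)
    (_h_ilog : ∀ (others : List Obj) (frames : List (Nat × FrameLayout)), Calls Lay μ Vorbis.WayInv (Vorbis.conv u₀) Vorbis.L.ilog.entry (Vorbis.Spec.ilog.spec others frames))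
    (_h_get_bits : ∀ (others : List Obj) (frames : List (Nat × FrameLayout)) (Blk : Block → Prop) (len : Nat), Calls Lay μ Vorbis.WayInv (Vorbis.conv u₀) Vorbis.L.get_bits.entry (Vorbis.Spec.get_bits.spec others frames Blk len))
    (_h_asan_load8_noabort : Asan.SmallCheck Lay μ Vorbis.WayInv (Vorbis.CodeOK u₀) [.rax, .rcx, .rdx] 8 Vorbis.L.__asan_load8_noabort.entry)
    (_h_asan_store1_noabort : Asan.SmallCheck Lay μ Vorbis.WayInv (Vorbis.CodeOK u₀) [.rax, .rdx] 1 Vorbis.L.__asan_store1_noabort.entry)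
    (_h_asan_load4_noabort : Asan.SmallCheck Lay μ Vorbis.WayInv (Vorbis.CodeOK u₀) [.rax, .rcx, .rdx] 4 Vorbis.L.__asan_load4_noabort.entry),
    Vorbis.Spec.StartDecoder.SegR10c Lay μ u₀

end Vorbis.Spec.start_decoder_R10c
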